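-- pv_equiv track=rewrite | github.com/Abhijeeth7/Resumelytics | jd_parser.py | _skill_variants
-- ===== SOURCE A (Python) =====
-- from typing import List, Dict, Optional
--
-- SKILL_ALIASES: Dict[str, List[str]] = {
--     "kubernetes": ["k8s"],
--     "javascript": ["js"],
--     "github actions": ["github action", "gh actions"],
--     "golang": ["go language"],
--     "amazon web services": ["aws"],
--     "terraform": ["tf"],
-- }
--
-- def _skill_variants(skill: str) -> List[str]:
--     skill_l = skill.lower()
--     variants = {skill_l}
--
--     # canonical -> aliases
--     if skill_l in SKILL_ALIASES:
--         variants.update(alias.lower() for alias in SKILL_ALIASES[skill_l])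
--
--     # alias -> canonical
--     for canonical, aliases in SKILL_ALIASES.items():
--         if skill_l in (alias.lower() for alias in aliases):
--             variants.add(canonical.lower())
--             variants.update(alias.lower() for alias in aliases)
--
--     return sorted(variants)
-- ===== SOURCE B (Python) =====
-- from typing import List, Dict
--
-- SKILL_ALIASES: Dict[str, List[str]] = {
--     "kubernetes": ["k8s"],
--     "javascript": ["js"],
--     "github actions": ["github action", "gh actions"],
--     "golang": ["go language"],
--     "amazon web services": ["aws"],
--     "terraform": ["tf"],
-- }
--
-- # Flat variant table built once at import time: every lowered name (canonical
-- # or alias) maps straight to the final SORTED list of its whole variant group.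
-- _VARIANT_GROUPS: Dict[str, List[str]] = {}
-- for _canonical, _aliases in SKILL_ALIASES.items():
--     _group = sorted({_canonical.lower(), *(a.lower() for a in _aliases)})
--     for _name in _group:
--         _VARIANT_GROUPS[_name] = _group
--
-- def _skill_variants(skill: str) -> List[str]:
--     skill_l = skill.lower()
--     return _VARIANT_GROUPS.get(skill_l, [skill_l])
-- ===== Notes on version B (the rewrite author's own statement) =====
-- stated objective: idiomatic
-- what changed: A builds a set per call and scans every alias group, then sorts; B precomputes, once at import, a flat table mapping every lowered name to its already-sorted variant group, so the function body is a single dict lookup with [skill_l] as fallback - no set, no loop, no per-call sort.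
import Mathlib
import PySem

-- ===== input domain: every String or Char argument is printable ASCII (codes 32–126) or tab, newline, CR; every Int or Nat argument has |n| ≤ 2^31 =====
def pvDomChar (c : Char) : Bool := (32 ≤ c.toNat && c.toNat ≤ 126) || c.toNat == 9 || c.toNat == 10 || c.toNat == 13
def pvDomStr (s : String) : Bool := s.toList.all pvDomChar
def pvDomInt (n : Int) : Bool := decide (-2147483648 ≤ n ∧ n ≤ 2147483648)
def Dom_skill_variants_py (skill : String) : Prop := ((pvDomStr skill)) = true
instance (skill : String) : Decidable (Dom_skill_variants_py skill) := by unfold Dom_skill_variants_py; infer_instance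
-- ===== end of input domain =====

-- B replaces A's per-call set building, alias-table scan and sort by a table built
-- once that maps every lowered name to its already-sorted variant group; the body
-- is a single lookup with [skill_l] as fallback.

def pySKILL_ALIASES : PySem.Dict String (List String) :=
  PySem.Dict.ofList
    [ ("kubernetes", ["k8s"]),
      ("javascript", ["js"]),
      ("github actions", ["github action", "gh actions"]),
      ("golang", ["go language"]),
      ("amazon web services", ["aws"]),
      ("terraform", ["tf"]) ]

-- ===== PORT A =====
def skill_variants_py (skill : String) : List String :=
  let skill_l := PySem.Str.lower skill
  let variants : PySem.Set String := PySem.Set.ofList [skill_l]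
  -- canonical -> aliases
  let variants :=
    if pySKILL_ALIASES.contains skill_l then
      PySem.Set.update variants ((pySKILL_ALIASES.getD skill_l []).map PySem.Str.lower)
    else variants
  -- alias -> canonical
  let variants := pySKILL_ALIASES.items.foldl
    (fun v (p : String × List String) =>
      if skill_l ∈ p.2.map PySem.Str.lower then
        PySem.Set.update (PySem.Set.add v (PySem.Str.lower p.1)) (p.2.map PySem.Str.lower)
      else v) variants
  PySem.List.sorted variants (fun x => x) false

-- ===== PORT B =====
-- flat variant table built once (the module-level for-loop of Source B)
def pyVariantGroups : PySem.Dict String (List String) :=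
  pySKILL_ALIASES.items.foldl
    (fun d (p : String × List String) =>
      let group := PySem.List.sorted
        (PySem.Set.update (PySem.Set.ofList [PySem.Str.lower p.1]) (p.2.map PySem.Str.lower))
        (fun x => x) false
      group.foldl (fun d name => d.insert name group) d)
    PySem.Dict.empty

def skill_variants_py_alt (skill : String) : List String :=
  let skill_l := PySem.Str.lower skill
  match pyVariantGroups.get? skill_l with
  | some g => g
  | none => [skill_l]

-- ===== PRECONDITION & SPEC =====
def Spec_skill_variants_py (skill : String) (out : List String) : Prop := out = skill_variants_py_alt skill
instance (skill : String) (out : List String) : Decidable (Spec_skill_variants_py skill out) := by unfold Spec_skill_variants_py; infer_instance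

-- ===== CLAIM (what is proved, stated in full; the proofs are below) =====
def Claim_equal_skill_variants_py : Prop := ∀ (skill : String), Dom_skill_variants_py skill → Spec_skill_variants_py skill (skill_variants_py skill)

-- ===== LEMMAS AND PROOFS =====

-- the flat table, evaluated once: the literal association list B's lookup hits
lemma groups_items : pyVariantGroups.items =
    [ ("k8s", ["k8s", "kubernetes"]),
      ("kubernetes", ["k8s", "kubernetes"]),
      ("javascript", ["javascript", "js"]),
      ("js", ["javascript", "js"]),
      ("gh actions", ["gh actions", "github action", "github actions"]),
      ("github action", ["gh actions", "github action", "github actions"]),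
      ("github actions", ["gh actions", "github action", "github actions"]),
      ("go language", ["go language", "golang"]),
      ("golang", ["go language", "golang"]),
      ("amazon web services", ["amazon web services", "aws"]),
      ("aws", ["amazon web services", "aws"]),
      ("terraform", ["terraform", "tf"]),
      ("tf", ["terraform", "tf"]) ] := by
  simp [pyVariantGroups, pySKILL_ALIASES, PySem.Dict.ofList, PySem.Dict.empty, PySem.Dict.insert, PySem.List.sorted_eq_foldl_insertBy, PySem.Set.update, PySem.Set.add, PySem.Set.ofList, PySem.Set.contains, PySem.Str.lower, PySem.Chars.lower]
  all_goals decide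

-- both ports are functions of the lowered input only; case-split on which of the
-- 13 table names it equals
lemma skill_variants_core (s : String) :
    skill_variants_py s = skill_variants_py_alt s := by
  unfold skill_variants_py skill_variants_py_alt
  generalize PySem.Str.lower s = t
  by_cases h0 : t = "kubernetes"
  · subst h0; simp [pySKILL_ALIASES, pyVariantGroups, PySem.Dict.ofList, PySem.Dict.update, PySem.Dict.contains, PySem.Dict.get?, PySem.Dict.getD, PySem.Dict.empty, PySem.Dict.insert, PySem.List.sorted_eq_foldl_insertBy, PySem.List.insertBy, PySem.Set.update, PySem.Set.add, PySem.Set.ofList, PySem.Set.contains, PySem.Str.lower, PySem.Chars.lower, PySem.Chars.lowerChar, PySem.Chars.isupper]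
    all_goals decide
  by_cases h1 : t = "javascript"
  · subst h1; simp [pySKILL_ALIASES, pyVariantGroups, PySem.Dict.ofList, PySem.Dict.update, PySem.Dict.contains, PySem.Dict.get?, PySem.Dict.getD, PySem.Dict.empty, PySem.Dict.insert, PySem.List.sorted_eq_foldl_insertBy, PySem.List.insertBy, PySem.Set.update, PySem.Set.add, PySem.Set.ofList, PySem.Set.contains, PySem.Str.lower, PySem.Chars.lower, PySem.Chars.lowerChar, PySem.Chars.isupper]
    all_goals decide
  by_cases h2 : t = "github actions"
  · subst h2; simp [pySKILL_ALIASES, pyVariantGroups, PySem.Dict.ofList, PySem.Dict.update, PySem.Dict.contains, PySem.Dict.get?, PySem.Dict.getD, PySem.Dict.empty, PySem.Dict.insert, PySem.List.sorted_eq_foldl_insertBy, PySem.List.insertBy, PySem.Set.update, PySem.Set.add, PySem.Set.ofList, PySem.Set.contains, PySem.Str.lower, PySem.Chars.lower, PySem.Chars.lowerChar, PySem.Chars.isupper]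
    all_goals decide
  by_cases h3 : t = "golang"
  · subst h3; simp [pySKILL_ALIASES, pyVariantGroups, PySem.Dict.ofList, PySem.Dict.update, PySem.Dict.contains, PySem.Dict.get?, PySem.Dict.getD, PySem.Dict.empty, PySem.Dict.insert, PySem.List.sorted_eq_foldl_insertBy, PySem.List.insertBy, PySem.Set.update, PySem.Set.add, PySem.Set.ofList, PySem.Set.contains, PySem.Str.lower, PySem.Chars.lower, PySem.Chars.lowerChar, PySem.Chars.isupper]
    all_goals decide
  by_cases h4 : t = "amazon web services"
  · subst h4; simp [pySKILL_ALIASES, pyVariantGroups, PySem.Dict.ofList, PySem.Dict.update, PySem.Dict.contains, PySem.Dict.get?, PySem.Dict.getD, PySem.Dict.empty, PySem.Dict.insert, PySem.List.sorted_eq_foldl_insertBy, PySem.List.insertBy, PySem.Set.update, PySem.Set.add, PySem.Set.ofList, PySem.Set.contains, PySem.Str.lower, PySem.Chars.lower, PySem.Chars.lowerChar, PySem.Chars.isupper]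
    all_goals decide
  by_cases h5 : t = "terraform"
  · subst h5; simp [pySKILL_ALIASES, pyVariantGroups, PySem.Dict.ofList, PySem.Dict.update, PySem.Dict.contains, PySem.Dict.get?, PySem.Dict.getD, PySem.Dict.empty, PySem.Dict.insert, PySem.List.sorted_eq_foldl_insertBy, PySem.List.insertBy, PySem.Set.update, PySem.Set.add, PySem.Set.ofList, PySem.Set.contains, PySem.Str.lower, PySem.Chars.lower, PySem.Chars.lowerChar, PySem.Chars.isupper]
    all_goals decide
  by_cases h6 : t = "k8s"
  · subst h6; simp [pySKILL_ALIASES, pyVariantGroups, PySem.Dict.ofList, PySem.Dict.update, PySem.Dict.contains, PySem.Dict.get?, PySem.Dict.empty, PySem.Dict.insert, PySem.List.sorted_eq_foldl_insertBy, PySem.List.insertBy, PySem.Set.update, PySem.Set.add, PySem.Set.ofList, PySem.Set.contains, PySem.Str.lower, PySem.Chars.lower, PySem.Chars.lowerChar, PySem.Chars.isupper]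
    all_goals decide
  by_cases h7 : t = "js"
  · subst h7; simp [pySKILL_ALIASES, pyVariantGroups, PySem.Dict.ofList, PySem.Dict.update, PySem.Dict.contains, PySem.Dict.get?, PySem.Dict.empty, PySem.Dict.insert, PySem.List.sorted_eq_foldl_insertBy, PySem.List.insertBy, PySem.Set.update, PySem.Set.add, PySem.Set.ofList, PySem.Set.contains, PySem.Str.lower, PySem.Chars.lower, PySem.Chars.lowerChar, PySem.Chars.isupper]
    all_goals decide
  by_cases h8 : t = "github action"
  · subst h8; simp [pySKILL_ALIASES, pyVariantGroups, PySem.Dict.ofList, PySem.Dict.update, PySem.Dict.contains, PySem.Dict.get?, PySem.Dict.empty, PySem.Dict.insert, PySem.List.sorted_eq_foldl_insertBy, PySem.List.insertBy, PySem.Set.update, PySem.Set.add, PySem.Set.ofList, PySem.Set.contains, PySem.Str.lower, PySem.Chars.lower, PySem.Chars.lowerChar, PySem.Chars.isupper]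
    all_goals decide
  by_cases h9 : t = "gh actions"
  · subst h9; simp [pySKILL_ALIASES, pyVariantGroups, PySem.Dict.ofList, PySem.Dict.update, PySem.Dict.contains, PySem.Dict.get?, PySem.Dict.empty, PySem.Dict.insert, PySem.List.sorted_eq_foldl_insertBy, PySem.List.insertBy, PySem.Set.update, PySem.Set.add, PySem.Set.ofList, PySem.Set.contains, PySem.Str.lower, PySem.Chars.lower, PySem.Chars.lowerChar, PySem.Chars.isupper]
    all_goals decide
  by_cases h10 : t = "go language"
  · subst h10; simp [pySKILL_ALIASES, pyVariantGroups, PySem.Dict.ofList, PySem.Dict.update, PySem.Dict.contains, PySem.Dict.get?, PySem.Dict.empty, PySem.Dict.insert, PySem.List.sorted_eq_foldl_insertBy, PySem.List.insertBy, PySem.Set.update, PySem.Set.add, PySem.Set.ofList, PySem.Set.contains, PySem.Str.lower, PySem.Chars.lower, PySem.Chars.lowerChar, PySem.Chars.isupper]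
    all_goals decide
  by_cases h11 : t = "aws"
  · subst h11; simp [pySKILL_ALIASES, pyVariantGroups, PySem.Dict.ofList, PySem.Dict.update, PySem.Dict.contains, PySem.Dict.get?, PySem.Dict.empty, PySem.Dict.insert, PySem.List.sorted_eq_foldl_insertBy, PySem.List.insertBy, PySem.Set.update, PySem.Set.add, PySem.Set.ofList, PySem.Set.contains, PySem.Str.lower, PySem.Chars.lower, PySem.Chars.lowerChar, PySem.Chars.isupper]
    all_goals decide
  by_cases h12 : t = "tf"
  · subst h12; simp [pySKILL_ALIASES, pyVariantGroups, PySem.Dict.ofList, PySem.Dict.update, PySem.Dict.contains, PySem.Dict.get?, PySem.Dict.empty, PySem.Dict.insert, PySem.List.sorted_eq_foldl_insertBy, PySem.List.insertBy, PySem.Set.update, PySem.Set.add, PySem.Set.ofList, PySem.Set.contains, PySem.Str.lower, PySem.Chars.lower, PySem.Chars.lowerChar, PySem.Chars.isupper]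
    all_goals decide
  simp [pySKILL_ALIASES, groups_items, PySem.Dict.ofList, PySem.Dict.update, PySem.Dict.contains, PySem.Dict.get?, PySem.Dict.empty, PySem.Dict.insert, PySem.List.sorted_eq_foldl_insertBy, PySem.List.insertBy, PySem.Set.update, PySem.Set.add, PySem.Set.ofList, PySem.Set.contains, PySem.Str.lower, PySem.Chars.lower, PySem.Chars.lowerChar, PySem.Chars.isupper, Ne.symm h0, Ne.symm h1, Ne.symm h2, Ne.symm h3, Ne.symm h4, Ne.symm h5, Ne.symm h6, Ne.symm h7, Ne.symm h8, Ne.symm h9, Ne.symm h10, Ne.symm h11, Ne.symm h12]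

-- ===== VERDICT (by name: the statement is the Claim_ definition above) =====
theorem skill_variants_py_spec : Claim_equal_skill_variants_py := by
  intro skill _
  unfold Spec_skill_variants_py
  exact skill_variants_core skill
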